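-- pv_equiv track=rewrite | github.com/avnestico/smashrank | app/compute.py | get_position_points
-- ===== SOURCE A (Python) =====
-- def get_position_points(position):
--     score_table = {1:  48,
--                    2:  40,
--                    3:  34,
--                    4:  29,
--                    5:  25,
--                    6:  22,
--                    7:  20,
--                    8:  19,
--                    9:  18,
--                    10: 17,
--                    11: 16,
--                    13: 15,
--                    15: 14,
--                    18: 13,
--                    21: 12,
--                    26: 11,
--                    31: 10,
--                    36:  9,
--                    41:  8,
--                    46:  7,
--                    51:  6,
--                    61:  5,
--                    71:  4,
--                    81:  3,
--                    91:  2,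
--                    101: 1,
--                    201: 0}
--
--     try:
--         position = int(position)
--         return score_table[max(k for k in score_table if k <= position)]
--     except ValueError:
--         return None
-- ===== SOURCE B (Python) =====
-- _KEYS = [1, 2, 3, 4, 5, 6, 7, 8, 9, 10, 11, 13, 15, 18, 21, 26, 31, 36, 41,
--          46, 51, 61, 71, 81, 91, 101, 201]
-- _VALS = [48, 40, 34, 29, 25, 22, 20, 19, 18, 17, 16, 15, 14, 13, 12, 11, 10,
--          9, 8, 7, 6, 5, 4, 3, 2, 1, 0]
--
--
-- def get_position_points(position):
--     try:
--         position = int(position)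
--     except ValueError:
--         return None
--     # binary search: lo ends as the number of thresholds <= position
--     lo, hi = 0, len(_KEYS)
--     while lo < hi:
--         mid = (lo + hi) // 2
--         if _KEYS[mid] <= position:
--             lo = mid + 1
--         else:
--             hi = mid
--     if lo == 0:
--         return None
--     return _VALS[lo - 1]
-- ===== Notes on version B (the rewrite author's own statement) =====
-- stated objective: idiomatic
-- what changed: Replaces the linear max-over-filtered-keys generator scan plus dict lookup with a hand-rolled binary search (bisect_right) over a presorted threshold list paired with a parallel values list.
import Mathlib
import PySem

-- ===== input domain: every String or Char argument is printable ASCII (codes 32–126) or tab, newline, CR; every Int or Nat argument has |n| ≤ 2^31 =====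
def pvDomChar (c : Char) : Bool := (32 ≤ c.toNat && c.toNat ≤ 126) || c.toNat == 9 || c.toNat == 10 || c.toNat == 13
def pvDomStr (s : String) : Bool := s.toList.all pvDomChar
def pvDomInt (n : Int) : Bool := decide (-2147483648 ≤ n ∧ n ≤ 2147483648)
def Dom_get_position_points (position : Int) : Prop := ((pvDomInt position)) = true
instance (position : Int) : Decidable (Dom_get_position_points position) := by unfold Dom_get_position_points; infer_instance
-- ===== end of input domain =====

-- B replaces A's linear max-over-filtered-keys scan and dict lookup with a hand-rolled
-- binary search over the presorted threshold list (idiomatic threshold-table lookup).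

-- ===== PORT A =====
-- score_table, in insertion order
def pvScoreTable : PySem.Dict Int Int :=
  PySem.Dict.mk
  [(1, 48), (2, 40), (3, 34), (4, 29), (5, 25), (6, 22), (7, 20), (8, 19),
   (9, 18), (10, 17), (11, 16), (13, 15), (15, 14), (18, 13), (21, 12),
   (26, 11), (31, 10), (36, 9), (41, 8), (46, 7), (51, 6), (61, 5), (71, 4),
   (81, 3), (91, 2), (101, 1), (201, 0)]

-- int(position) is the identity on an Int argument; max(... empty ...) raises ValueError,
-- caught by A's except → None; otherwise score_table[max_key] (key always present).
def get_position_points (position : Int) : Option Int :=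
  match PySem.List.max? ((PySem.Dict.keys pvScoreTable).filter (fun k => k ≤ position)) (fun k => k) with
  | some k => PySem.Dict.get? pvScoreTable k
  | none => none

-- ===== PORT B =====
def pvKeys : List Int :=
  [1, 2, 3, 4, 5, 6, 7, 8, 9, 10, 11, 13, 15, 18, 21, 26, 31, 36, 41, 46,
   51, 61, 71, 81, 91, 101, 201]
def pvVals : List Int :=
  [48, 40, 34, 29, 25, 22, 20, 19, 18, 17, 16, 15, 14, 13, 12, 11, 10, 9,
   8, 7, 6, 5, 4, 3, 2, 1, 0]

-- Source B's while-loop (lo, hi nonnegative throughout, so Nat; `(lo+hi)//2` = Nat division)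
def pvBisect (position : Int) : Nat → Nat → Nat → Nat
  | 0, lo, _ => lo
  | fuel + 1, lo, hi =>
    if lo < hi then
      let mid := (lo + hi) / 2
      if pvKeys.getD mid 0 ≤ position then pvBisect position fuel (mid + 1) hi
      else pvBisect position fuel lo mid
    else lo

def get_position_points_alt (position : Int) : Option Int :=
  let lo := pvBisect position pvKeys.length 0 pvKeys.length
  if lo = 0 then none else some (pvVals.getD (lo - 1) 0)

-- ===== PRECONDITION & SPEC =====
def Spec_get_position_points (position : Int) (out : Option Int) : Prop := out = get_position_points_alt position
instance (position : Int) (out : Option Int) : Decidable (Spec_get_position_points position out) := by unfold Spec_get_position_points; infer_instance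

-- ===== CLAIM (what is proved, stated in full; the proofs are below) =====
def Claim_equal_get_position_points : Prop := ∀ (position : Int), Dom_get_position_points position → Spec_get_position_points position (get_position_points position)

-- ===== LEMMAS AND PROOFS =====

-- both programs read `position` only through comparisons `k ≤ position`, k a threshold
theorem pvA_congr (p q : Int)
    (h : ∀ k ∈ pvKeys, (k ≤ p ↔ k ≤ q)) :
    get_position_points p = get_position_points q := by
  unfold get_position_points
  have hkeys : PySem.Dict.keys pvScoreTable = pvKeys := rfl
  have hf : (PySem.Dict.keys pvScoreTable).filter (fun k => decide (k ≤ p))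
      = (PySem.Dict.keys pvScoreTable).filter (fun k => decide (k ≤ q)) :=
    List.filter_congr (fun x hx => by simp [h x (hkeys ▸ hx)])
  simp only [hf]

theorem pvBisect_congr (p q : Int) (h : ∀ k ∈ pvKeys, (k ≤ p ↔ k ≤ q)) :
    ∀ fuel lo hi, hi ≤ pvKeys.length → pvBisect p fuel lo hi = pvBisect q fuel lo hi := by
  intro fuel
  induction fuel with
  | zero => intro lo hi h2; rfl
  | succ n ih =>
    intro lo hi h2
    unfold pvBisect
    by_cases hlt : lo < hi
    · have hmid : (lo + hi) / 2 < pvKeys.length := by omega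
      have hmem : pvKeys.getD ((lo + hi) / 2) 0 ∈ pvKeys := by
        rw [List.getD_eq_getElem _ _ hmid]; exact List.getElem_mem _
      by_cases hc : pvKeys.getD ((lo + hi) / 2) 0 ≤ p
      · have hc' := (h _ hmem).mp hc
        simp only [hlt, if_true, hc, hc']
        exact ih ((lo + hi) / 2 + 1) hi h2
      · have hc' : ¬ pvKeys.getD ((lo + hi) / 2) 0 ≤ q := fun hq => hc ((h _ hmem).mpr hq)
        simp only [hlt, if_true, hc, hc', if_false]
        exact ih lo ((lo + hi) / 2) (by omega)
    · simp [hlt]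

theorem pvB_congr (p q : Int) (h : ∀ k ∈ pvKeys, (k ≤ p ↔ k ≤ q)) :
    get_position_points_alt p = get_position_points_alt q := by
  unfold get_position_points_alt
  rw [pvBisect_congr p q h pvKeys.length 0 pvKeys.length (le_refl _)]

-- ===== VERDICT (by name: the statement is the Claim_ definition above) =====
theorem get_position_points_spec : Claim_equal_get_position_points := by
  intro p _
  unfold Spec_get_position_points
  by_cases hlo : p < 1
  · have h : ∀ k ∈ pvKeys, (k ≤ p ↔ k ≤ (0 : Int)) := by
      have h1 : ∀ k ∈ pvKeys, (1 : Int) ≤ k := by decide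
      intro k hk
      have := h1 k hk
      constructor <;> intro <;> omega
    rw [pvA_congr p 0 h, pvB_congr p 0 h]
    decide
  · by_cases hhi : 201 < p
    · have h : ∀ k ∈ pvKeys, (k ≤ p ↔ k ≤ (201 : Int)) := by
        have h1 : ∀ k ∈ pvKeys, k ≤ (201 : Int) := by decide
        intro k hk
        have := h1 k hk
        constructor <;> intro <;> omega
      rw [pvA_congr p 201 h, pvB_congr p 201 h]
      decide
    · have h1 : 1 ≤ p := by omega
      have h2 : p ≤ 201 := by omega
      interval_cases p <;> decide
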